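-- pv_equiv track=rewrite | github.com/openharmony/arkcompiler_runtime_core | static_core/plugins/ets/tools/migration_visualizer/src/arkts_migration_visualizer/build/integrate_dep.py | build_suffix_lookup
-- ===== SOURCE A (Python) =====
-- from collections import defaultdict
-- from typing import Any, DefaultDict, Dict, Iterable, List, Optional, Sequence, Set, Tuple
--
-- def build_suffix_lookup(path_timing: Dict[str, int]) -> Dict[str, Tuple[int, Set[str]]]:
--     suffix_lookup: Dict[str, Tuple[int, Set[str]]] = {}
--     owners: DefaultDict[str, Set[str]] = defaultdict(set)
--     values: DefaultDict[str, int] = defaultdict(int)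
--
--     for path_key, timing in path_timing.items():
--         parts = path_key.split("/")
--         max_len = min(len(parts), 8)
--         for size in range(2, max_len + 1):
--             suffix = "/".join(parts[-size:])
--             owners[suffix].add(path_key)
--             values[suffix] += timing
--
--     for suffix, owned_paths in owners.items():
--         suffix_lookup[suffix] = (values[suffix], owned_paths)
--     return suffix_lookup
-- ===== SOURCE B (Python) =====
-- def build_suffix_lookup(path_timing):
--     # Stage 1: collect, per suffix, the list of (path_key, timing) occurrences.
--     # Suffixes are cut directly out of the raw string by scanning '/' positions
--     # from the right with rfind (no split/join): the suffix of size k starts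
--     # right after the k-th slash from the end; the whole key is the largest one.
--     groups = {}
--     for path_key, timing in path_timing.items():
--         occ = (path_key, timing)
--         cut = path_key.rfind("/")
--         if cut >= 0:
--             size = 2
--             while size <= 8:
--                 cut = path_key.rfind("/", 0, cut)
--                 if cut < 0:
--                     groups.setdefault(path_key, []).append(occ)
--                     break
--                 groups.setdefault(path_key[cut + 1:], []).append(occ)
--                 size += 1
--     # Stage 2: reduce each occurrence list to (total timing, owner set).
--     return {s: (sum(t for _, t in g), {p for p, _ in g}) for s, g in groups.items()}
-- ===== Notes on version B (the rewrite author's own statement) =====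
-- stated objective: alternative
-- what changed: B never splits or joins: it cuts each suffix directly out of the raw path string by scanning slash positions from the right with str.rfind, and replaces A's incremental two-defaultdict accumulation plus final assembly pass by a group-then-reduce pipeline (collect per-suffix occurrence lists, then reduce each list to (sum, owner set) in a final comprehension).
import Mathlib
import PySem

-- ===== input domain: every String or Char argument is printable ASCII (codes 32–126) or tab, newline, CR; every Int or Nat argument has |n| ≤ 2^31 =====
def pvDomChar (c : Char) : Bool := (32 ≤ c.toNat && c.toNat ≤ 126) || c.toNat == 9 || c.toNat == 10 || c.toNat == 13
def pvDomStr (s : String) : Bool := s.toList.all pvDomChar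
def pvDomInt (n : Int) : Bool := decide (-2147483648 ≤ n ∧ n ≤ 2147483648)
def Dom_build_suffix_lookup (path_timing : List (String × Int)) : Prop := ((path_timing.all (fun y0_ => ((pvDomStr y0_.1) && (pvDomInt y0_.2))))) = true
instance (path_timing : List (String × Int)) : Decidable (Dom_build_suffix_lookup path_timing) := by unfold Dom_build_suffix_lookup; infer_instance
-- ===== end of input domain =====

-- B cuts each suffix directly out of the raw path string by scanning '/' positions from the
-- right with rfind (no split/join), and replaces A's two-defaultdict accumulation plus
-- assembly pass by a group-then-reduce pipeline: an alternative of the same cost.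

-- ===== PORT A =====
-- the Python parameter is a dict: realize the association list with Python dict-construction
-- semantics (first position, last value) before iterating .items()  (shared by both ports)
def pvNormalize (path_timing : List (String × Int)) : PySem.Dict String Int :=
  path_timing.foldl (fun d p => d.insert p.1 p.2) PySem.Dict.empty

-- path_key.split("/")  (sep "/" is non-empty, so split? is always some)
def pvPartsOf (path_key : String) : List String :=
  (PySem.Str.split? path_key "/").getD []

-- body of A's inner loop once the suffix string is computed: update the two defaultdicts
def pvUpdA (kv : String × Int)
    (st : PySem.Dict String (PySem.Set String) × PySem.Dict String Int) (suffix : String) :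
    PySem.Dict String (PySem.Set String) × PySem.Dict String Int :=
  (st.1.insert suffix (PySem.Set.add (st.1.getD suffix PySem.Set.empty) kv.1),
   st.2.insert suffix (st.2.getD suffix 0 + kv.2))

-- A's inner loop body: suffix = "/".join(parts[-size:]); owners[suffix].add(...); values[suffix] += ...
def pvInnerA (kv : String × Int) (parts : List String)
    (st : PySem.Dict String (PySem.Set String) × PySem.Dict String Int) (size : Int) :
    PySem.Dict String (PySem.Set String) × PySem.Dict String Int :=
  pvUpdA kv st (PySem.Str.join "/" (PySem.List.slice parts (some (-size)) none))

-- A's outer loop body: one (path_key, timing) item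
def pvPathA (st : PySem.Dict String (PySem.Set String) × PySem.Dict String Int)
    (kv : String × Int) : PySem.Dict String (PySem.Set String) × PySem.Dict String Int :=
  let parts := pvPartsOf kv.1
  let max_len : Int := min (parts.length : Int) 8
  (PySem.List.pyRange 2 (max_len + 1) 1).foldl (pvInnerA kv parts) st

def build_suffix_lookup (path_timing : List (String × Int)) : List (String × Int × List String) :=
  let ov := (pvNormalize path_timing).items.foldl pvPathA (PySem.Dict.empty, PySem.Dict.empty)
  -- final assembly loop: suffix_lookup[suffix] = (values[suffix], owned_paths)
  (ov.1.items.foldl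
    (fun (sl : PySem.Dict String (Int × List String)) sp =>
      sl.insert sp.1 (ov.2.getD sp.1 0, sp.2)) PySem.Dict.empty).items

-- ===== PORT B =====
-- groups.setdefault(suffix, []).append(occ): insert-in-place keeps order, appends if fresh
def pvSetdefApp (g : PySem.Dict String (List (String × Int))) (suffix : String)
    (occ : String × Int) : PySem.Dict String (List (String × Int)) :=
  g.insert suffix (g.getD suffix [] ++ [occ])

-- B's while loop ('size = 2; while size <= 8') as structural recursion on the 7 remaining sizes
def pvLoopB (occ : String × Int) (pk : String) :
    Nat → Int → PySem.Dict String (List (String × Int)) → PySem.Dict String (List (String × Int))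
  | 0, _, g => g
  | fuel + 1, cut, g =>
    let c := PySem.Str.rfindFrom pk "/" 0 (some cut)
    if c < 0 then pvSetdefApp g pk occ
    else pvLoopB occ pk fuel c (pvSetdefApp g (PySem.Str.slice pk (some (c + 1)) none) occ)

-- B's outer loop body: cut = path_key.rfind("/"); if cut >= 0: scan further slashes
def pvPathB (g : PySem.Dict String (List (String × Int))) (kv : String × Int) :
    PySem.Dict String (List (String × Int)) :=
  let cut := PySem.Str.rfind kv.1 "/"
  if 0 ≤ cut then pvLoopB kv kv.1 7 cut g else g

-- one group reduced: (sum(t for _, t in g), {p for p, _ in g})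
def pvReduce (g : List (String × Int)) : Int × List String :=
  ((g.map Prod.snd).foldl (· + ·) 0, PySem.Set.ofList (g.map Prod.fst))

def build_suffix_lookup_alt (path_timing : List (String × Int)) : List (String × Int × List String) :=
  let groups := (pvNormalize path_timing).items.foldl pvPathB PySem.Dict.empty
  (groups.items.foldl
    (fun (d : PySem.Dict String (Int × List String)) sg =>
      d.insert sg.1 (pvReduce sg.2)) PySem.Dict.empty).items

-- ===== PRECONDITION & SPEC =====
def Spec_build_suffix_lookup (path_timing : List (String × Int)) (out : List (String × Int × List String)) : Prop := out = build_suffix_lookup_alt path_timing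
instance (path_timing : List (String × Int)) (out : List (String × Int × List String)) : Decidable (Spec_build_suffix_lookup path_timing out) := by unfold Spec_build_suffix_lookup; infer_instance

-- ===== CLAIM (what is proved, stated in full; the proofs are below) =====
def Claim_equal_build_suffix_lookup : Prop := ∀ (path_timing : List (String × Int)), Dom_build_suffix_lookup path_timing → Spec_build_suffix_lookup path_timing (build_suffix_lookup path_timing)

-- ===== LEMMAS AND PROOFS =====

-- join with '/' abbreviated
def pvJC (ps : List (List Char)) : List Char := PySem.Chars.join ['/'] ps

-- a plain structural split on '/'
def pvSplitSlash : List Char → List (List Char)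
  | [] => [[]]
  | c :: rest =>
    if c = '/' then [] :: pvSplitSlash rest
    else match pvSplitSlash rest with
      | [] => [[c]]
      | p :: ps => (c :: p) :: ps

lemma pvSplitSlash_ne_nil (cs : List Char) : pvSplitSlash cs ≠ [] := by
  cases cs with
  | nil => simp [pvSplitSlash]
  | cons c rest =>
    simp only [pvSplitSlash]
    split_ifs
    · simp
    · cases h : pvSplitSlash rest <;> simp

-- prepend a prefix onto the first chunk
def pvConsFirst (pre : List Char) : List (List Char) → List (List Char)
  | [] => [pre]
  | p :: ps => (pre ++ p) :: ps

lemma pvGo_eq (l : List Char) : ∀ (fuel : Nat) (cur : List Char) (acc : List (List Char)),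
    l.length < fuel →
    PySem.Chars.splitOn.go ['/'] fuel l cur acc
      = acc.reverse ++ pvConsFirst cur.reverse (pvSplitSlash l) := by
  induction l with
  | nil =>
    intro fuel cur acc h
    match fuel, h with
    | f + 1, _ =>
      rw [PySem.Chars.splitOn.go]
      · simp [pvSplitSlash, pvConsFirst]
      · omega
  | cons c rest ih =>
    intro fuel cur acc h
    match fuel, h with
    | f + 1, h =>
      by_cases hc : c = '/'
      · subst hc
        rw [PySem.Chars.splitOn.go]
        rw [if_pos (by simp [List.isPrefixOf])]
        rw [show List.drop (['/'] : List Char).length ('/' :: rest) = rest from rfl]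
        rw [ih f [] (cur.reverse :: acc) (by simpa using Nat.lt_of_succ_lt_succ h)]
        cases hr : pvSplitSlash rest with
        | nil => exact absurd hr (pvSplitSlash_ne_nil rest)
        | cons p ps => simp [pvSplitSlash, pvConsFirst, hr]
      · rw [PySem.Chars.splitOn.go]
        rw [if_neg (by simp [List.isPrefixOf]; intro h'; exact hc h'.symm)]
        rw [ih f (c :: cur) acc (by simpa using Nat.lt_of_succ_lt_succ h)]
        simp only [pvSplitSlash, if_neg hc]
        cases hr : pvSplitSlash rest with
        | nil => exact absurd hr (pvSplitSlash_ne_nil rest)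
        | cons p ps => simp [pvConsFirst]

lemma pvSplitOn_eq (cs : List Char) : PySem.Chars.splitOn cs ['/'] = pvSplitSlash cs := by
  have h := pvGo_eq cs (cs.length + 1) [] [] (by omega)
  rw [PySem.Chars.splitOn, h]
  cases hr : pvSplitSlash cs with
  | nil => exact absurd hr (pvSplitSlash_ne_nil cs)
  | cons p ps => simp [pvConsFirst]

lemma pvJoin_splitSlash (cs : List Char) : pvJC (pvSplitSlash cs) = cs := by
  induction cs with
  | nil => simp [pvSplitSlash, pvJC, PySem.Chars.join_singleton]
  | cons c rest ih =>
    by_cases hc : c = '/'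
    · subst hc
      simp only [pvSplitSlash, if_true]
      cases hr : pvSplitSlash rest with
      | nil => exact absurd hr (pvSplitSlash_ne_nil rest)
      | cons p ps =>
        rw [hr] at ih
        simp only [pvJC] at ih ⊢
        rw [PySem.Chars.join_cons_cons]
        simp [ih]
    · simp only [pvSplitSlash, if_neg hc]
      cases hr : pvSplitSlash rest with
      | nil => exact absurd hr (pvSplitSlash_ne_nil rest)
      | cons p ps =>
        rw [hr] at ih
        cases ps with
        | nil =>
          simp only [pvJC, PySem.Chars.join_singleton] at *
          simp [ih]
        | cons q qs =>
          simp only [pvJC, PySem.Chars.join_cons_cons] at *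
          simp [ih]

lemma pvSplitSlash_no_slash (cs : List Char) : ∀ p ∈ pvSplitSlash cs, '/' ∉ p := by
  induction cs with
  | nil => simp [pvSplitSlash]
  | cons c rest ih =>
    by_cases hc : c = '/'
    · subst hc
      simp only [pvSplitSlash, if_true]
      intro p hp
      rcases List.mem_cons.mp hp with h | h
      · subst h; simp
      · exact ih p h
    · simp only [pvSplitSlash, if_neg hc]
      cases hr : pvSplitSlash rest with
      | nil => exact absurd hr (pvSplitSlash_ne_nil rest)
      | cons q qs =>
        rw [hr] at ih
        intro p hp
        rcases List.mem_cons.mp hp with h | h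
        · subst h
          simp only [List.mem_cons]
          rintro (h' | h')
          · exact hc h'.symm
          · exact ih q (by simp) h'
        · exact ih p (by simp [h])

lemma pvJC_append (ps qs : List (List Char)) (hps : ps ≠ []) (hqs : qs ≠ []) :
    pvJC (ps ++ qs) = pvJC ps ++ '/' :: pvJC qs := by
  induction ps with
  | nil => exact absurd rfl hps
  | cons p ps' ih =>
    cases ps' with
    | nil =>
      cases qs with
      | nil => exact absurd rfl hqs
      | cons q qs' =>
        simp only [pvJC, List.singleton_append, PySem.Chars.join_cons_cons,
          PySem.Chars.join_singleton]
        simp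
    | cons p2 ps'' =>
      have h2 : (p2 :: ps'') ++ qs ≠ [] := by simp
      simp only [pvJC, List.cons_append, PySem.Chars.join_cons_cons] at *
      rw [ih (by simp)]
      simp

-- ['/'] is a prefix of l iff l starts with '/'
lemma pvPrefix_slash (l : List Char) :
    (['/'] : List Char).isPrefixOf l = true ↔ ∃ t, l = '/' :: t := by
  rw [List.isPrefixOf_iff_prefix]
  constructor
  · rintro ⟨t, ht⟩
    exact ⟨t, ht.symm⟩
  · rintro ⟨t, rfl⟩
    exact ⟨t, rfl⟩

lemma pvGoRfind_no_slash (s : List Char) (h : '/' ∉ s) :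
    ∀ (k : Nat), PySem.Chars.rfind.go s ['/'] k = -1 := by
  intro k
  induction k with
  | zero =>
    rw [PySem.Chars.rfind.go]
    rw [if_neg]
    intro hp
    rcases (pvPrefix_slash s).mp hp with ⟨t, ht⟩
    exact h (ht ▸ by simp)
  | succ j ih =>
    rw [PySem.Chars.rfind.go]
    rw [if_neg, ih]
    intro hp
    rcases (pvPrefix_slash _).mp hp with ⟨t, ht⟩
    have hm : '/' ∈ List.drop (j + 1) s := by rw [ht]; simp
    exact h (List.mem_of_mem_drop hm)

lemma pvRfind_no_slash (s : List Char) (h : '/' ∉ s) : PySem.Chars.rfind s ['/'] = -1 :=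
  pvGoRfind_no_slash s h _

lemma pvGoRfind_last (xs q : List Char) (hq : '/' ∉ q) :
    ∀ (k : Nat), xs.length ≤ k →
      PySem.Chars.rfind.go (xs ++ '/' :: q) ['/'] k = (xs.length : Int) := by
  intro k
  induction k with
  | zero =>
    intro hk
    have hx : xs = [] := List.length_eq_zero_iff.mp (Nat.le_zero.mp hk)
    subst hx
    rw [PySem.Chars.rfind.go]
    rw [if_pos ((pvPrefix_slash _).mpr ⟨q, by simp⟩)]
    rfl
  | succ j ih =>
    intro hk
    rw [PySem.Chars.rfind.go]
    by_cases he : xs.length = j + 1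
    · rw [if_pos]
      · exact_mod_cast he.symm
      · apply (pvPrefix_slash _).mpr
        refine ⟨q, ?_⟩
        rw [← he, List.drop_append_of_le_length (le_refl _)]
        simp
    · have hlt : xs.length ≤ j := by omega
      have hd : List.drop (j + 1) (xs ++ '/' :: q) = List.drop (j - xs.length) q := by
        rw [List.drop_append, List.drop_of_length_le (by omega), List.nil_append]
        rw [show j + 1 - xs.length = (j - xs.length) + 1 from by omega, List.drop_succ_cons]
      have hnp : ¬ ((['/'] : List Char).isPrefixOf (List.drop (j + 1) (xs ++ '/' :: q)) = true) := by
        intro hp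
        rcases (pvPrefix_slash _).mp hp with ⟨t, ht⟩
        rw [hd] at ht
        have hm : '/' ∈ List.drop (j - xs.length) q := by rw [ht]; simp
        exact hq (List.mem_of_mem_drop hm)
      rw [if_neg hnp, ih hlt]

lemma pvRfind_last (xs q : List Char) (hq : '/' ∉ q) :
    PySem.Chars.rfind (xs ++ '/' :: q) ['/'] = (xs.length : Int) := by
  rw [PySem.Chars.rfind]
  exact pvGoRfind_last xs q hq _ (by simp)

lemma pvRfindFrom_take (s : List Char) (cut : Nat) (hcut : cut ≤ s.length) :
    PySem.Chars.rfindFrom s ['/'] 0 (some (cut : Int)) = PySem.Chars.rfind (s.take cut) ['/'] := by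
  rw [PySem.Chars.rfindFrom]
  have h1 : ¬ ((s.length : Int) < (cut : Int)) := by exact_mod_cast Nat.not_lt.mpr hcut
  have h2 : ¬ ((cut : Int) < 0) := by omega
  simp only [h1, if_false, h2]
  rw [if_neg (by omega)]
  simp only [Int.toNat_natCast]
  simp only [show ¬((0:Int) < 0) from by omega, if_false]
  rw [show ((0:Int).toNat) = 0 from rfl, List.drop_zero]
  split_ifs with h
  · exact h.symm
  · simp

-- the stream of suffix strings B emits for one path
def pvEmitAux (pk : String) : Nat → Int → List String
  | 0, _ => []
  | fuel + 1, cut =>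
    let c := PySem.Str.rfindFrom pk "/" 0 (some cut)
    if c < 0 then [pk]
    else PySem.Str.slice pk (some (c + 1)) none :: pvEmitAux pk fuel c

def pvSB (pk : String) : List String :=
  let cut := PySem.Str.rfind pk "/"
  if 0 ≤ cut then pvEmitAux pk 7 cut else []

lemma pvLoopB_foldl (occ : String × Int) (pk : String) :
    ∀ (fuel : Nat) (cut : Int) (g : PySem.Dict String (List (String × Int))),
      pvLoopB occ pk fuel cut g
        = (pvEmitAux pk fuel cut).foldl (fun g s => pvSetdefApp g s occ) g := by
  intro fuel
  induction fuel with
  | zero => intro cut g; rfl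
  | succ f ih =>
    intro cut g
    simp only [pvLoopB, pvEmitAux]
    split_ifs with h
    · rfl
    · rw [ih]
      rfl

lemma pvEmitAux_spec : ∀ (fuel : Nat) (ps qs : List (List Char)), ps ≠ [] → qs ≠ [] →
    (∀ p ∈ ps, '/' ∉ p) → (∀ p ∈ qs, '/' ∉ p) →
    pvEmitAux (String.ofList (pvJC (ps ++ qs))) fuel ((pvJC ps).length : Int)
      = (PySem.List.pyRange ((qs.length : Int) + 1)
            ((qs.length : Int) + 1 + (min ps.length fuel : Nat)) 1).map
          (fun size => String.ofList
            (pvJC (List.drop (ps.length + qs.length - size.toNat) (ps ++ qs)))) := by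
  intro fuel
  induction fuel with
  | zero =>
    intro ps qs hps hqs hnops hnoqs
    rw [PySem.List.pyRange_one_eq_nil (by simp)]
    rfl
  | succ f ih =>
    intro ps qs hps hqs hnops hnoqs
    have hslash : "/".toList = ['/'] := by decide
    have hcs : pvJC (ps ++ qs) = pvJC ps ++ '/' :: pvJC qs := pvJC_append ps qs hps hqs
    have hfind : PySem.Str.rfindFrom (String.ofList (pvJC (ps ++ qs))) "/" 0
        (some ((pvJC ps).length : Int)) = PySem.Chars.rfind (pvJC ps) ['/'] := by
      rw [PySem.Str.rfindFrom, String.toList_ofList, hslash]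
      rw [pvRfindFrom_take _ _ (by rw [hcs]; simp)]
      rw [hcs, List.take_left]
    rcases List.eq_nil_or_concat ps with rfl | ⟨ds, b, rfl⟩
    · exact absurd rfl hps
    · simp only [List.concat_eq_append] at *
      have hb : '/' ∉ b := hnops b (by simp)
      rcases List.eq_nil_or_concat ds with rfl | ⟨es, b2, hds⟩
      · -- ps = [b]: rfind finds nothing, emit the whole string, stop
        have hfind' : PySem.Chars.rfind (pvJC ([] ++ [b])) ['/'] = -1 := by
          rw [show pvJC ([] ++ [b]) = b from PySem.Chars.join_singleton _ _]
          exact pvRfind_no_slash b hb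
        simp only [pvEmitAux]
        rw [hfind, hfind']
        rw [if_pos (by omega)]
        have hr : PySem.List.pyRange ((qs.length : Int) + 1)
            ((qs.length : Int) + 1 + ((min ([] ++ [b] : List (List Char)).length (f+1) : Nat) : Int)) 1
            = [(qs.length : Int) + 1] := by
          rw [show ((min ([] ++ [b] : List (List Char)).length (f+1) : Nat) : Int) = 1 by simp]
          rw [PySem.List.pyRange_one_cons (by omega), PySem.List.pyRange_one_eq_nil (by omega)]
        rw [hr]
        simp only [List.map_cons, List.map_nil]
        congr 1
        rw [show (((qs.length : Int) + 1).toNat) = qs.length + 1 from by omega]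
        rw [show ([] ++ [b] : List (List Char)).length + qs.length - (qs.length + 1) = 0 from by simp; omega]
        rfl
      · -- ps = ds ++ [b] with ds ≠ []: rfind finds the slash before b
        have hdsne : ds ≠ [] := by rw [hds]; simp
        have hcs2 : pvJC ((ds ++ [b]) ++ qs) = pvJC ds ++ '/' :: pvJC (b :: qs) := by
          rw [List.append_assoc]
          exact pvJC_append ds ([b] ++ qs) hdsne (by simp)
        have hfind' : PySem.Chars.rfind (pvJC (ds ++ [b])) ['/'] = ((pvJC ds).length : Int) := by
          rw [pvJC_append ds [b] hdsne (by simp), show pvJC [b] = b from PySem.Chars.join_singleton _ _]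
          exact pvRfind_last _ _ hb
        simp only [pvEmitAux]
        rw [hfind, hfind']
        rw [if_neg (by omega)]
        -- the emitted suffix is pvJC (b :: qs)
        have hslice : PySem.Str.slice (String.ofList (pvJC ((ds ++ [b]) ++ qs)))
            (some (((pvJC ds).length : Int) + 1)) none
            = String.ofList (pvJC (b :: qs)) := by
          rw [PySem.Str.slice, String.toList_ofList]
          rw [PySem.Chars.slice_eq_listSlice]
          rw [show ((pvJC ds).length : Int) + 1 = (((pvJC ds).length + 1 : Nat) : Int) from by push_cast; ring]
          rw [PySem.List.slice_from_natCast]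
          rw [hcs2, show (pvJC ds).length + 1 = (pvJC ds ++ ['/']).length from by simp]
          rw [show pvJC ds ++ '/' :: pvJC (b :: qs) = (pvJC ds ++ ['/']) ++ pvJC (b :: qs) from by simp]
          rw [List.drop_left]
        -- the recursive call is the IH with ps := ds, qs := b :: qs
        have hih := ih ds (b :: qs) hdsne (by simp)
          (fun p hp => hnops p (by simp [hp]))
          (by intro p hp
              rcases List.mem_cons.mp hp with h | h
              · exact h ▸ hb
              · exact hnoqs p h)
        rw [show (ds ++ (b :: qs) : List (List Char)) = ((ds ++ [b]) ++ qs) from by simp] at hih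
        rw [hih, hslice]
        -- assemble the two pyRange maps
        have hlt : (qs.length : Int) + 1
            < (qs.length : Int) + 1 + ((min (ds ++ [b] : List (List Char)).length (f+1) : Nat) : Int) := by
          push_cast
          simp only [List.length_append, List.length_cons, List.length_nil]
          omega
        conv_rhs => rw [PySem.List.pyRange_one_cons hlt]
        rw [List.map_cons]
        refine congrArg₂ List.cons ?_ ?_
        · rw [show (((qs.length : Int) + 1).toNat) = qs.length + 1 from by omega]
          rw [show (ds ++ [b] : List (List Char)).length + qs.length - (qs.length + 1) = ds.length from by
            simp only [List.length_append, List.length_cons, List.length_nil]; omega]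
          rw [show (ds ++ [b] ++ qs : List (List Char)) = ds ++ (b :: qs) from by simp, List.drop_left]
        · rw [show ((qs.length : Int) + 1 + 1) = ((b :: qs).length : Int) + 1 from by simp]
          rw [show (qs.length : Int) + 1 + ((min (ds ++ [b] : List (List Char)).length (f+1) : Nat) : Int)
              = ((b :: qs).length : Int) + 1 + ((min ds.length f : Nat) : Int) from by
            push_cast
            simp only [List.length_append, List.length_cons, List.length_nil]
            omega]
          apply List.map_congr_left
          intro size hs
          rw [show (ds ++ [b] : List (List Char)).length + qs.length = ds.length + (b :: qs).length from by
            simp only [List.length_append, List.length_cons, List.length_nil]; omega]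

-- A's per-path suffix stream
def pvSA (pk : String) : List String :=
  (PySem.List.pyRange 2 (min ((pvPartsOf pk).length : Int) 8 + 1) 1).map
    (fun size => PySem.Str.join "/" (PySem.List.slice (pvPartsOf pk) (some (-size)) none))

lemma pvStrJoin_map (chunk : List (List Char)) :
    PySem.Str.join "/" (chunk.map String.ofList) = String.ofList (pvJC chunk) := by
  rw [PySem.Str.join, pvJC]
  rw [show "/".toList = ['/'] from by decide, List.map_map]
  congr 1
  rw [show List.map (String.toList ∘ String.ofList) chunk = List.map id chunk from
    List.map_congr_left (fun p _ => String.toList_ofList)]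
  simp

lemma pvStreams_eq (pk : String) : pvSA pk = pvSB pk := by
  have hslash : "/".toList = ['/'] := by decide
  have hparts : pvPartsOf pk = (pvSplitSlash pk.toList).map String.ofList := by
    rw [pvPartsOf, PySem.Str.split?, hslash, PySem.Chars.split?]
    rw [if_neg (by simp)]
    rw [pvSplitOn_eq]
    rfl
  have hno := pvSplitSlash_no_slash pk.toList
  have hjoin := pvJoin_splitSlash pk.toList
  rcases List.eq_nil_or_concat (pvSplitSlash pk.toList) with hnil | ⟨ds, b, hcat⟩
  · exact absurd hnil (pvSplitSlash_ne_nil _)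
  simp only [List.concat_eq_append] at hcat
  have hb : '/' ∉ b := hno b (by rw [hcat]; simp)
  rcases List.eq_nil_or_concat ds with rfl | ⟨es, b2, hds⟩
  · -- a path with no slash: both streams are empty
    have hcs : pk.toList = b := by
      rw [← hjoin, hcat]
      exact PySem.Chars.join_singleton _ _
    have hrf : PySem.Str.rfind pk "/" = -1 := by
      rw [PySem.Str.rfind, hslash, hcs]
      exact pvRfind_no_slash b hb
    simp only [pvSA, pvSB, hrf]
    rw [if_neg (by omega)]
    rw [hparts, hcat]
    rw [show (min ((([] ++ [b] : List (List Char)).map String.ofList).length : Int) 8 + 1) = 2 from by simp]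
    rw [PySem.List.pyRange_one_eq_nil (by omega)]
    rfl
  · have hdsne : ds ≠ [] := by rw [hds]; simp
    have hnods : ∀ p ∈ ds, '/' ∉ p := fun p hp => hno p (by rw [hcat]; simp [hp])
    have hcs : pk.toList = pvJC ds ++ '/' :: b := by
      rw [← hjoin, hcat]
      rw [pvJC_append ds [b] hdsne (by simp), show pvJC [b] = b from PySem.Chars.join_singleton _ _]
    have hrf : PySem.Str.rfind pk "/" = ((pvJC ds).length : Int) := by
      rw [PySem.Str.rfind, hslash, hcs]
      exact pvRfind_last _ _ hb
    have hspec := pvEmitAux_spec 7 ds [b] hdsne (by simp) hnods (by simpa using hb)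
    have hpk : String.ofList (pvJC (ds ++ [b])) = pk := by
      rw [← hcat, hjoin, String.ofList_toList]
    rw [hpk] at hspec
    simp only [pvSA, pvSB]
    rw [hrf, if_pos (by omega)]
    rw [hspec, hparts, hcat]
    rw [show (min ((((ds ++ [b] : List (List Char)).map String.ofList).length : Nat) : Int) 8 + 1)
        = (([b] : List (List Char)).length : Int) + 1 + ((min ds.length 7 : Nat) : Int) from by
      push_cast
      simp only [List.length_map, List.length_append, List.length_cons, List.length_nil]
      omega]
    apply List.map_congr_left
    intro size hs
    rw [PySem.List.mem_pyRange_one] at hs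
    rw [show -size = -((size.toNat : Nat) : Int) from by omega]
    rw [PySem.List.slice_from_neg_natCast _ _ (by omega)]
    rw [List.length_map]
    rw [← List.map_drop]
    rw [pvStrJoin_map]
    rw [show (ds ++ [b] : List (List Char)).length = ds.length + ([b] : List (List Char)).length from by simp]

-- projections of the groups dict onto A's owners and values dicts
def pvPO (G : PySem.Dict String (List (String × Int))) : PySem.Dict String (PySem.Set String) :=
  ⟨G.items.map (fun kv => (kv.1, PySem.Set.ofList (kv.2.map Prod.fst)))⟩
def pvPV (G : PySem.Dict String (List (String × Int))) : PySem.Dict String Int :=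
  ⟨G.items.map (fun kv => (kv.1, (kv.2.map Prod.snd).foldl (· + ·) 0))⟩

lemma pvPO_getD (G : PySem.Dict String (List (String × Int))) (s : String) :
    (pvPO G).getD s PySem.Set.empty = PySem.Set.ofList ((G.getD s []).map Prod.fst) := by
  simp only [pvPO, PySem.Dict.getD, PySem.Dict.get?, List.find?_map]
  have hp : ((fun (p : String × PySem.Set String) => p.1 == s) ∘
      (fun kv : String × List (String × Int) => (kv.1, PySem.Set.ofList (kv.2.map Prod.fst))))
      = (fun kv : String × List (String × Int) => kv.1 == s) := rfl
  rw [hp]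
  cases G.items.find? (fun kv => kv.1 == s) <;> rfl

lemma pvPV_getD (G : PySem.Dict String (List (String × Int))) (s : String) :
    (pvPV G).getD s 0 = ((G.getD s []).map Prod.snd).foldl (· + ·) 0 := by
  simp only [pvPV, PySem.Dict.getD, PySem.Dict.get?, List.find?_map]
  have hp : ((fun (p : String × Int) => p.1 == s) ∘
      (fun kv : String × List (String × Int) => (kv.1, (kv.2.map Prod.snd).foldl (· + ·) 0)))
      = (fun kv : String × List (String × Int) => kv.1 == s) := rfl
  rw [hp]
  cases G.items.find? (fun kv => kv.1 == s) <;> rfl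

lemma pvPO_insert (G : PySem.Dict String (List (String × Int))) (s : String)
    (l : List (String × Int)) :
    pvPO (G.insert s l) = (pvPO G).insert s (PySem.Set.ofList (l.map Prod.fst)) := by
  have hc : (PySem.Dict.mk (G.items.map
      (fun kv => (kv.1, PySem.Set.ofList (kv.2.map Prod.fst)))) :
      PySem.Dict String (PySem.Set String)).contains s = G.contains s := by
    simp only [PySem.Dict.contains, List.any_map]; rfl
  by_cases h : G.contains s = true
  · simp only [pvPO, PySem.Dict.insert, hc, h, if_true]
    simp only [List.map_map, PySem.Dict.mk.injEq]
    apply List.map_congr_left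
    intro kv _
    by_cases hk : kv.1 == s
    · simp only [Function.comp_apply, hk, if_true]
    · simp only [Function.comp_apply, hk]
      simp only [beq_iff_eq] at hk
      simp
  · simp only [pvPO, PySem.Dict.insert, hc, h]
    simp

lemma pvPV_insert (G : PySem.Dict String (List (String × Int))) (s : String)
    (l : List (String × Int)) :
    pvPV (G.insert s l) = (pvPV G).insert s ((l.map Prod.snd).foldl (· + ·) 0) := by
  have hc : (PySem.Dict.mk (G.items.map
      (fun kv => (kv.1, (kv.2.map Prod.snd).foldl (· + ·) 0))) :
      PySem.Dict String Int).contains s = G.contains s := by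
    simp only [PySem.Dict.contains, List.any_map]; rfl
  by_cases h : G.contains s = true
  · simp only [pvPV, PySem.Dict.insert, hc, h, if_true]
    simp only [List.map_map, PySem.Dict.mk.injEq]
    apply List.map_congr_left
    intro kv _
    by_cases hk : kv.1 == s
    · simp only [Function.comp_apply, hk, if_true]
    · simp only [Function.comp_apply, hk]
      simp only [beq_iff_eq] at hk
      simp
  · simp only [pvPV, PySem.Dict.insert, hc, h]
    simp

lemma pvUpd_comm (kv : String × Int) (G : PySem.Dict String (List (String × Int))) (s : String) :
    pvUpdA kv (pvPO G, pvPV G) s = (pvPO (pvSetdefApp G s kv), pvPV (pvSetdefApp G s kv)) := by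
  simp only [pvUpdA, pvSetdefApp, pvPO_insert, pvPV_insert, pvPO_getD, pvPV_getD]
  rw [Prod.mk.injEq]
  refine ⟨?_, ?_⟩
  · congr 1
    rw [List.map_append, PySem.Set.ofList, PySem.Set.ofList, List.foldl_append]
    rfl
  · congr 1
    rw [List.map_append, List.foldl_append]
    rfl

lemma pvFoldUpd_comm (kv : String × Int) :
    ∀ (L : List String) (G : PySem.Dict String (List (String × Int))),
      L.foldl (pvUpdA kv) (pvPO G, pvPV G)
        = (pvPO (L.foldl (fun g s => pvSetdefApp g s kv) G),
           pvPV (L.foldl (fun g s => pvSetdefApp g s kv) G)) := by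
  intro L
  induction L with
  | nil => intro G; rfl
  | cons s L' ih => intro G; simp only [List.foldl_cons, pvUpd_comm]; exact ih _

lemma pvPath_comm (kv : String × Int) (G : PySem.Dict String (List (String × Int))) :
    pvPathA (pvPO G, pvPV G) kv = (pvPO (pvPathB G kv), pvPV (pvPathB G kv)) := by
  have hA : pvPathA (pvPO G, pvPV G) kv = (pvSA kv.1).foldl (pvUpdA kv) (pvPO G, pvPV G) := by
    unfold pvPathA pvSA pvInnerA
    rw [List.foldl_map]
  have hB : pvPathB G kv = (pvSB kv.1).foldl (fun g s => pvSetdefApp g s kv) G := by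
    show (if 0 ≤ PySem.Str.rfind kv.1 "/" then pvLoopB kv kv.1 7 (PySem.Str.rfind kv.1 "/") G else G)
      = List.foldl (fun g s => pvSetdefApp g s kv) G
        (if 0 ≤ PySem.Str.rfind kv.1 "/" then pvEmitAux kv.1 7 (PySem.Str.rfind kv.1 "/") else [])
    split_ifs with h
    · exact pvLoopB_foldl kv kv.1 7 _ G
    · rfl
  rw [hA, hB, pvStreams_eq, pvFoldUpd_comm]

lemma pvOuter_comm : ∀ (ps : List (String × Int)) (G : PySem.Dict String (List (String × Int))),
    ps.foldl pvPathA (pvPO G, pvPV G) = (pvPO (ps.foldl pvPathB G), pvPV (ps.foldl pvPathB G)) := by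
  intro ps
  induction ps with
  | nil => intro G; rfl
  | cons kv ps' ih => intro G; simp only [List.foldl_cons, pvPath_comm]; exact ih _

lemma pvOuterB_nodup : ∀ (ps : List (String × Int)) (G : PySem.Dict String (List (String × Int))),
    G.keys.Nodup → (ps.foldl pvPathB G).keys.Nodup := by
  have hone : ∀ (kv : String × Int) (G : PySem.Dict String (List (String × Int))),
      G.keys.Nodup → (pvPathB G kv).keys.Nodup := by
    intro kv G h
    show (if 0 ≤ PySem.Str.rfind kv.1 "/" then
        pvLoopB kv kv.1 7 (PySem.Str.rfind kv.1 "/") G else G).keys.Nodup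
    split_ifs with hc
    · rw [pvLoopB_foldl]
      generalize pvEmitAux kv.1 7 (PySem.Str.rfind kv.1 "/") = L
      induction L generalizing G with
      | nil => exact h
      | cons s L' ih => exact ih _ (PySem.Dict.nodup_keys_insert _ _ _ h)
    · exact h
  intro ps
  induction ps with
  | nil => exact fun G h => h
  | cons kv ps' ih => exact fun G h => ih _ (hone kv G h)

-- B's final dict comprehension, as items: pvReduce mapped over the groups items
lemma pvAssembleB (G : PySem.Dict String (List (String × Int))) (hnd : G.keys.Nodup) :
    (G.items.foldl
      (fun (d : PySem.Dict String (Int × List String)) sg =>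
        d.insert sg.1 (pvReduce sg.2)) PySem.Dict.empty).items
      = G.items.map (fun sg => (sg.1, pvReduce sg.2)) := by
  have h := PySem.Dict.items_foldl_insert_fresh G.items (fun sg => sg.1)
    (fun sg => pvReduce sg.2) PySem.Dict.empty (fun a _ => rfl)
    (by simpa [PySem.Dict.keys] using hnd)
  simpa using h

-- A's final assembly loop builds the same items
lemma pvAssembleA (G : PySem.Dict String (List (String × Int))) (hnd : G.keys.Nodup) :
    ((pvPO G).items.foldl
      (fun (sl : PySem.Dict String (Int × List String)) sp =>
        sl.insert sp.1 ((pvPV G).getD sp.1 0, sp.2)) PySem.Dict.empty).items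
      = G.items.map (fun sg => (sg.1, pvReduce sg.2)) := by
  have hkeys : (pvPV G).keys.Nodup := by
    simpa [pvPV, PySem.Dict.keys, List.map_map, Function.comp] using hnd
  have hV : ∀ kv ∈ G.items, (pvPV G).getD kv.1 0 = (kv.2.map Prod.snd).foldl (· + ·) 0 := by
    intro kv hkv
    exact PySem.Dict.getD_of_mem_items (pvPV G)
      (by simp only [pvPV]; exact List.mem_map_of_mem hkv) hkeys 0
  have h1 : (pvPO G).items.foldl
      (fun (sl : PySem.Dict String (Int × List String)) sp =>
        sl.insert sp.1 ((pvPV G).getD sp.1 0, sp.2)) PySem.Dict.empty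
      = G.items.foldl
        (fun (sl : PySem.Dict String (Int × List String)) sg =>
          sl.insert sg.1 (pvReduce sg.2)) PySem.Dict.empty := by
    simp only [pvPO, List.foldl_map]
    apply PySem.List.foldl_congr_mem
    intro sl kv hkv
    rw [hV kv hkv]
    rfl
  rw [h1]
  exact pvAssembleB G hnd

-- ===== VERDICT (by name: the statement is the Claim_ definition above) =====
theorem build_suffix_lookup_spec : Claim_equal_build_suffix_lookup := by
  intro path_timing _
  unfold Spec_build_suffix_lookup build_suffix_lookup build_suffix_lookup_alt
  have h := pvOuter_comm (pvNormalize path_timing).items PySem.Dict.empty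
  have he : ((pvPO PySem.Dict.empty, pvPV PySem.Dict.empty) :
      PySem.Dict String (PySem.Set String) × PySem.Dict String Int)
      = (PySem.Dict.empty, PySem.Dict.empty) := rfl
  rw [he] at h
  simp only [h]
  have hnd : ((pvNormalize path_timing).items.foldl pvPathB PySem.Dict.empty).keys.Nodup :=
    pvOuterB_nodup _ _ (by simp [PySem.Dict.keys, PySem.Dict.empty])
  rw [pvAssembleA _ hnd, pvAssembleB _ hnd]
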